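-- pv_equiv track=rewrite | github.com/HexedCoder/Advent-of-Code | 2024/Day22/test.py | secret
-- ===== SOURCE A (Python) =====
-- from collections import deque, Counter
--
-- PRUNE = 0b111111111111111111111111
--
-- _CACHE = {}
--
-- def secret(v, n=1):
--     i = 0
--     seq = deque()
--     price_map = {}
--     while i < n:
--         if v in _CACHE:
--             v_, p, d = _CACHE[v]
--         else:
--             v_ = (v ^ (v << 6)) & PRUNE
--             v_ = (v_ ^ (v_ >> 5)) & PRUNE
--             v_ = (v_ ^ (v_ << 11)) & PRUNE
--             p = v_ % 10
--             d = (v_ % 10 - v % 10)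
--             _CACHE[v] = v_, p, d
--         v = v_
--         seq.append(d)
--         if i >= 3:
--             k = tuple(seq)
--             if k not in price_map:
--                 price_map[k] = p
--             seq.popleft()
--         i += 1
--     return v, price_map
-- ===== SOURCE B (Python) =====
-- PRUNE = 0b111111111111111111111111
--
-- def secret(v, n=1):
--     # Two-pass: build the price/diff arrays in one sequential pass,
--     # then fill price_map by indexing 4-windows (first occurrence wins).
--     prices = []
--     diffs = []
--     cur = v
--     for _ in range(n):
--         nxt = (cur ^ (cur << 6)) & PRUNE
--         nxt = (nxt ^ (nxt >> 5)) & PRUNE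
--         nxt = (nxt ^ (nxt << 11)) & PRUNE
--         prices.append(nxt % 10)
--         diffs.append(nxt % 10 - cur % 10)
--         cur = nxt
--     price_map = {}
--     for i in range(3, len(diffs)):
--         key = (diffs[i - 3], diffs[i - 2], diffs[i - 1], diffs[i])
--         if key not in price_map:
--             price_map[key] = prices[i]
--     return cur, price_map
-- ===== Notes on version B (the rewrite author's own statement) =====
-- stated objective: alternative
-- what changed: Replaces the online deque-window/while loop (and the memoization cache, which only affects speed, not outputs) with a two-pass decomposition: one pass builds the price and diff arrays, a second index loop over 4-windows fills price_map with first-occurrence-wins.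
import Mathlib
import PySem

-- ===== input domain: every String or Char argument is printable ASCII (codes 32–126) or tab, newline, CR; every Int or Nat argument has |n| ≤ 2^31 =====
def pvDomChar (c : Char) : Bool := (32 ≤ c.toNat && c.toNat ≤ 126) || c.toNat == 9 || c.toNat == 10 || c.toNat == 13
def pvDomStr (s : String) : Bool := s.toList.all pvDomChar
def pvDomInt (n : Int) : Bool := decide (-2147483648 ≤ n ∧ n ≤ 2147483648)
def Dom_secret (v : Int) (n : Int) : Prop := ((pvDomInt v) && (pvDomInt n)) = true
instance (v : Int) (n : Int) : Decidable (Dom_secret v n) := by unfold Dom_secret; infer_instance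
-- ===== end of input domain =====

-- B replaces A's online deque-window while-loop (and its pure memoization cache, which
-- only affects speed, never outputs) by a two-pass decomposition: build the price/diff
-- arrays first, then fill the map by an index loop over 4-windows (first occurrence wins).
-- Objective: alternative, same O(n) cost; a timing run measured B faster by a
-- constant factor (no per-step deque/tuple/cache overhead). A's module-level _CACHE
-- mutation is a side effect not modelled here; it stores a pure function of v, so the
-- return value is unaffected.

-- ===== PORT A =====
def pvPRUNE : Int := 16777215   -- 0b111111111111111111111111

-- A's while-loop: state (i, v, seq, price_map); the _CACHE branch recomputes the same
-- pure triple (v_, p, d), so the port always takes the else-branch computation.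
def secretLoopA (i n v : Int) (seq : List Int) (pm : PySem.Dict (List Int) Int) :
    Int × PySem.Dict (List Int) Int :=
  if h : i < n then
    let v1 := PySem.Int.band (PySem.Int.bxor v (v <<< (6 : Nat))) pvPRUNE
    let v2 := PySem.Int.band (PySem.Int.bxor v1 (v1 >>> (5 : Nat))) pvPRUNE
    let v3 := PySem.Int.band (PySem.Int.bxor v2 (v2 <<< (11 : Nat))) pvPRUNE
    let p := PySem.Int.mod v3 10
    let d := PySem.Int.mod v3 10 - PySem.Int.mod v 10
    let seq1 := seq ++ [d]
    if 3 ≤ i then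
      -- if k not in price_map: price_map[k] = p; then seq.popleft()
      secretLoopA (i + 1) n v3 seq1.tail (if pm.contains seq1 then pm else pm.insert seq1 p)
    else
      secretLoopA (i + 1) n v3 seq1 pm
  else (v, pm)
termination_by (n - i).toNat
decreasing_by all_goals omega

def secret (v : Int) (n : Int) : Int × (List (List Int × Int)) :=
  let r := secretLoopA 0 n v [] PySem.Dict.empty
  (r.1, r.2.items)

-- ===== PORT B =====
-- first pass of Source B: for _ in range(n): append price and diff, advance cur
def secretBuildB (cur : Int) (k : Nat) (prices diffs : List Int) :
    Int × List Int × List Int :=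
  match k with
  | 0 => (cur, prices, diffs)
  | k + 1 =>
    let v1 := PySem.Int.band (PySem.Int.bxor cur (cur <<< (6 : Nat))) pvPRUNE
    let v2 := PySem.Int.band (PySem.Int.bxor v1 (v1 >>> (5 : Nat))) pvPRUNE
    let v3 := PySem.Int.band (PySem.Int.bxor v2 (v2 <<< (11 : Nat))) pvPRUNE
    secretBuildB v3 k (prices ++ [PySem.Int.mod v3 10])
      (diffs ++ [PySem.Int.mod v3 10 - PySem.Int.mod cur 10])

def secret_alt (v : Int) (n : Int) : Int × (List (List Int × Int)) :=
  let b := secretBuildB v n.toNat [] []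
  let prices := b.2.1
  let diffs := b.2.2
  -- second pass: for i in range(3, len(diffs)); indices are always in range,
  -- so pyGetD's default 0 is never used
  let pm := (PySem.List.pyRange 3 (diffs.length : Int) 1).foldl
    (fun pm i =>
      let key := [PySem.List.pyGetD diffs (i - 3) 0, PySem.List.pyGetD diffs (i - 2) 0,
                  PySem.List.pyGetD diffs (i - 1) 0, PySem.List.pyGetD diffs i 0]
      if pm.contains key then pm else pm.insert key (PySem.List.pyGetD prices i 0))
    PySem.Dict.empty
  (b.1, pm.items)

-- ===== PRECONDITION & SPEC =====
def Spec_secret (v : Int) (n : Int) (out : Int × (List (List Int × Int))) : Prop := out = secret_alt v n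
instance (v : Int) (n : Int) (out : Int × (List (List Int × Int))) : Decidable (Spec_secret v n out) := by unfold Spec_secret; infer_instance

-- ===== CLAIM (what is proved, stated in full; the proofs are below) =====
def Claim_equal_secret : Prop := ∀ (v : Int) (n : Int), Dom_secret v n → Spec_secret v n (secret v n)

-- ===== LEMMAS AND PROOFS =====

-- the pure step both programs compute
def pvStep (v : Int) : Int :=
  let v1 := PySem.Int.band (PySem.Int.bxor v (v <<< (6 : Nat))) pvPRUNE
  let v2 := PySem.Int.band (PySem.Int.bxor v1 (v1 >>> (5 : Nat))) pvPRUNE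
  PySem.Int.band (PySem.Int.bxor v2 (v2 <<< (11 : Nat))) pvPRUNE

def pvFinal (v : Int) : Nat → Int
  | 0 => v
  | k + 1 => pvFinal (pvStep v) k

-- (price, diff) pairs of the chain
def pvPD (v : Int) : Nat → List (Int × Int)
  | 0 => []
  | k + 1 =>
    (PySem.Int.mod (pvStep v) 10, PySem.Int.mod (pvStep v) 10 - PySem.Int.mod v 10)
      :: pvPD (pvStep v) k

-- reference scan: A's window mechanics over the (p, d) stream
def pvScan (seq : List Int) (pd : List (Int × Int)) (pm : PySem.Dict (List Int) Int) :
    PySem.Dict (List Int) Int :=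
  match pd with
  | [] => pm
  | (p, d) :: rest =>
    let s1 := seq ++ [d]
    if s1.length = 4 then
      pvScan s1.tail rest (if pm.contains s1 then pm else pm.insert s1 p)
    else pvScan s1 rest pm

theorem pvScan_cons_len3 (seq : List Int) (p d : Int) (rest : List (Int × Int))
    (pm : PySem.Dict (List Int) Int) (h : seq.length = 3) :
    pvScan seq ((p, d) :: rest) pm =
      pvScan (seq ++ [d]).tail rest
        (if pm.contains (seq ++ [d]) then pm else pm.insert (seq ++ [d]) p) := by
  simp [pvScan, h]

theorem pvScan_cons_short (seq : List Int) (p d : Int) (rest : List (Int × Int))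
    (pm : PySem.Dict (List Int) Int) (h : seq.length < 3) :
    pvScan seq ((p, d) :: rest) pm = pvScan (seq ++ [d]) rest pm := by
  have h3 : seq.length ≠ 3 := by omega
  simp [pvScan, h3]

theorem secretLoopA_eq (k : Nat) : ∀ (i n v : Int) (seq : List Int) pm,
    0 ≤ i → (n - i).toNat = k → seq.length = min i.toNat 3 →
    secretLoopA i n v seq pm = (pvFinal v k, pvScan seq (pvPD v k) pm) := by
  induction k with
  | zero =>
    intro i n v seq pm hi hk hl
    rw [secretLoopA]
    rw [dif_neg (by omega)]
    simp [pvFinal, pvPD, pvScan]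
  | succ k ih =>
    intro i n v seq pm hi hk hl
    rw [secretLoopA]
    rw [dif_pos (by omega)]
    by_cases h3 : 3 ≤ i
    · simp only [if_pos h3]
      rw [ih (i+1) n _ _ _ (by omega) (by omega) (by simp [hl]; omega)]
      simp only [pvFinal, pvPD]
      rw [pvScan_cons_len3 _ _ _ _ _ (by omega)]
      simp only [pvStep]
    · simp only [if_neg h3]
      rw [ih (i+1) n _ _ _ (by omega) (by omega) (by simp [hl]; omega)]
      simp only [pvFinal, pvPD]
      rw [pvScan_cons_short _ _ _ _ _ (by omega)]
      simp only [pvStep]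

theorem secretBuildB_eq (k : Nat) : ∀ (cur : Int) (prices diffs : List Int),
    secretBuildB cur k prices diffs =
      (pvFinal cur k, prices ++ (pvPD cur k).map (·.1), diffs ++ (pvPD cur k).map (·.2)) := by
  induction k with
  | zero => intro cur prices diffs; simp [secretBuildB, pvFinal, pvPD]
  | succ k ih =>
    intro cur prices diffs
    simp only [secretBuildB, pvFinal, pvPD, pvStep, ih, List.map_cons, List.append_assoc,
      List.cons_append, List.nil_append]

-- the index-window fold of B equals the scan, from position j with the current window
theorem pvScan_fold (k : Nat) : ∀ (pd : List (Int × Int)) (j : Nat) pm, 3 ≤ j → j + k = pd.length →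
    pvScan [(pd.map (·.2)).getD (j-3) 0, (pd.map (·.2)).getD (j-2) 0, (pd.map (·.2)).getD (j-1) 0]
        (pd.drop j) pm =
      (PySem.List.pyRange (j : Int) ((pd.map (·.2)).length : Int) 1).foldl
        (fun pm i =>
          let key := [PySem.List.pyGetD (pd.map (·.2)) (i - 3) 0,
                      PySem.List.pyGetD (pd.map (·.2)) (i - 2) 0,
                      PySem.List.pyGetD (pd.map (·.2)) (i - 1) 0,
                      PySem.List.pyGetD (pd.map (·.2)) i 0]
          if pm.contains key then pm else pm.insert key (PySem.List.pyGetD (pd.map (·.1)) i 0))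
        pm := by
  induction k with
  | zero =>
    intro pd j pm h3 hk
    rw [List.drop_eq_nil_of_le (by omega)]
    rw [PySem.List.pyRange_one_eq_nil (by simp; omega)]
    simp [pvScan]
  | succ k ih =>
    intro pd j pm h3 hk
    have hj : j < pd.length := by omega
    rw [PySem.List.pyRange_one_cons (by simp; omega)]
    simp only [List.foldl_cons]
    rw [List.drop_eq_getElem_cons hj]
    have hc3 : PySem.List.pyGetD (pd.map (·.2)) ((j : Int) - 3) 0 = (pd.map (·.2)).getD (j-3) 0 := by
      rw [show (j : Int) - 3 = ((j - 3 : Nat) : Int) by omega, PySem.List.pyGetD_natCast]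
    have hc2 : PySem.List.pyGetD (pd.map (·.2)) ((j : Int) - 2) 0 = (pd.map (·.2)).getD (j-2) 0 := by
      rw [show (j : Int) - 2 = ((j - 2 : Nat) : Int) by omega, PySem.List.pyGetD_natCast]
    have hc1 : PySem.List.pyGetD (pd.map (·.2)) ((j : Int) - 1) 0 = (pd.map (·.2)).getD (j-1) 0 := by
      rw [show (j : Int) - 1 = ((j - 1 : Nat) : Int) by omega, PySem.List.pyGetD_natCast]
    have hgd : (pd.map (·.2)).getD j 0 = pd[j].2 := by
      rw [List.getD_eq_getElem _ _ (by simpa using hj)]; simp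
    have hcj : PySem.List.pyGetD (pd.map (·.2)) ((j : Int)) 0 = pd[j].2 := by
      rw [PySem.List.pyGetD_natCast, hgd]
    have hpj : PySem.List.pyGetD (pd.map (·.1)) ((j : Int)) 0 = pd[j].1 := by
      rw [PySem.List.pyGetD_natCast, List.getD_eq_getElem _ _ (by simpa using hj)]; simp
    simp only [hc3, hc2, hc1, hcj, hpj]
    rw [pvScan_cons_len3 _ _ _ _ _ (by simp)]
    have ih' := ih pd (j+1) (if pm.contains [(pd.map (·.2)).getD (j-3) 0,
        (pd.map (·.2)).getD (j-2) 0, (pd.map (·.2)).getD (j-1) 0, pd[j].2] then pm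
      else pm.insert [(pd.map (·.2)).getD (j-3) 0, (pd.map (·.2)).getD (j-2) 0,
        (pd.map (·.2)).getD (j-1) 0, pd[j].2] pd[j].1) (by omega) (by omega)
    rw [show (j + 1 - 3 : Nat) = j - 2 by omega, show (j + 1 - 2 : Nat) = j - 1 by omega,
      show (j + 1 - 1 : Nat) = j by omega, hgd, Nat.cast_add, Nat.cast_one] at ih'
    rw [← ih']
    simp

theorem pvScan_entry (pd : List (Int × Int)) (pm : PySem.Dict (List Int) Int) :
    pvScan [] pd pm =
      (PySem.List.pyRange 3 ((pd.map (·.2)).length : Int) 1).foldl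
        (fun pm i =>
          let key := [PySem.List.pyGetD (pd.map (·.2)) (i - 3) 0,
                      PySem.List.pyGetD (pd.map (·.2)) (i - 2) 0,
                      PySem.List.pyGetD (pd.map (·.2)) (i - 1) 0,
                      PySem.List.pyGetD (pd.map (·.2)) i 0]
          if pm.contains key then pm else pm.insert key (PySem.List.pyGetD (pd.map (·.1)) i 0))
        pm := by
  match pd with
  | [] => simp [pvScan, PySem.List.pyRange_one_eq_nil]
  | [a] => simp [pvScan, PySem.List.pyRange_one_eq_nil]
  | [a, b] => simp [pvScan, PySem.List.pyRange_one_eq_nil]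
  | a :: b :: c :: rest =>
    have h := pvScan_fold rest.length (a :: b :: c :: rest) 3 pm (by omega) (by simp; omega)
    simp only [List.drop_succ_cons, List.drop_zero] at h
    rw [pvScan_cons_short _ _ _ _ _ (by simp), pvScan_cons_short _ _ _ _ _ (by simp),
      pvScan_cons_short _ _ _ _ _ (by simp)]
    simp only [List.nil_append, List.cons_append]
    rw [show ((3 : Nat) : Int) = (3 : Int) by rfl] at h
    simpa using h

-- ===== VERDICT (by name: the statement is the Claim_ definition above) =====
theorem secret_spec : Claim_equal_secret := by
  intro v n _
  unfold Spec_secret secret secret_alt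
  rw [secretLoopA_eq n.toNat 0 n v [] PySem.Dict.empty (le_refl 0) (by omega) (by simp)]
  rw [secretBuildB_eq]
  simp only [List.nil_append]
  rw [pvScan_entry]
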